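-- pv_equiv track=rewrite | github.com/Florence3546/CRM | apps/common/biz_utils/utils_permission.py | normalize_perms_code
-- ===== SOURCE A (Python) =====
-- def normalize_perms_code(perms_code_list): # 格式化权限码
--     '''注意规范权限码:小写就是强行去掉权限码。如：ABCDcBb => AD'''
--     code_list = list(set(''.join(perms_code_list)))
--     remove_list = [i for i in code_list if i.islower()]
--     for c in remove_list:
--         try:
--             while True:
--                 code_list.remove(c)
--                 code_list.remove(c.upper())
--         except ValueError:
--             pass
--     code_list.sort()
--     return ''.join(code_list)
-- ===== SOURCE B (Python) =====
-- def normalize_perms_code(perms_code_list):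
--     chars = set(''.join(perms_code_list))
--     removed = set()
--     for c in chars:
--         if c.islower():
--             removed.add(c)
--             removed.add(c.upper())
--     return ''.join(sorted(chars - removed))
-- ===== Notes on version B (the rewrite author's own statement) =====
-- stated objective: simpler
-- what changed: Replaces A's while-True/try-except repeated list.remove mechanism with one pass that collects an explicit removed set (each lowercase char and its uppercase partner) and returns the sorted set difference.
import Mathlib
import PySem

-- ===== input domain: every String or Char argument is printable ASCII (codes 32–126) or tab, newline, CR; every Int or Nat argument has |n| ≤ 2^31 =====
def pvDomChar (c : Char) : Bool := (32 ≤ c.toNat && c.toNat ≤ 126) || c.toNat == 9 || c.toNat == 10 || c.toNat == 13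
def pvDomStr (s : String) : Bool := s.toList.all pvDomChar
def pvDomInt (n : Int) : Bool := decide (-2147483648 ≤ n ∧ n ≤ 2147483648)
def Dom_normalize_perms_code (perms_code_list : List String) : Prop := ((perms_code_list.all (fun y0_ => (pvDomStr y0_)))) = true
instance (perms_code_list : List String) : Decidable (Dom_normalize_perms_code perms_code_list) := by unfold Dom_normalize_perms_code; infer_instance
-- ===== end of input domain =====

-- B replaces A's while-True/try-except repeated list.remove mechanism with one pass
-- collecting an explicit removed set and returning the sorted set difference (simpler).


-- ===== PORT A =====

theorem pvRemove?_length_lt {cl cl1 : List Char} {c : Char}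
    (h : PySem.List.remove? cl c = some cl1) : cl1.length < cl.length := by
  have hc : c ∈ cl := by
    by_contra hn
    rw [(PySem.List.remove?_eq_none_iff cl c).2 hn] at h
    simp at h
  rw [PySem.List.remove?_eq_some_erase cl c hc] at h
  cases h
  exact List.length_erase_of_mem hc ▸ Nat.sub_lt (List.length_pos_of_mem hc) one_pos

def pvRemoveLoop (cl : List Char) (c : Char) : List Char :=
  match h : PySem.List.remove? cl c with
  | none => cl
  | some cl1 =>
    match h2 : PySem.List.remove? cl1 (PySem.Chars.upperChar c) with
    | none => cl1
    | some cl2 => pvRemoveLoop cl2 c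
termination_by cl.length
decreasing_by exact lt_trans (pvRemove?_length_lt h2) (pvRemove?_length_lt h)

-- A sorts the list at the end, so porting list(set(..)) via the first-occurrence
-- PySem.Set order is exact for the returned string.
def normalize_perms_code (perms_code_list : List String) : String :=
  let code_list : List Char := PySem.Set.ofList (PySem.Str.join "" perms_code_list).toList
  let remove_list : List Char := code_list.filter (fun i => PySem.Chars.islower i)
  let final : List Char := remove_list.foldl pvRemoveLoop code_list
  String.ofList (PySem.List.sorted final (fun x => x) false)

-- ===== PORT B =====
def normalize_perms_code_alt (perms_code_list : List String) : String :=
  let chars : PySem.Set Char := PySem.Set.ofList (PySem.Str.join "" perms_code_list).toList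
  let removed : PySem.Set Char := chars.foldl
    (fun s c => if PySem.Chars.islower c then
        PySem.Set.add (PySem.Set.add s c) (PySem.Chars.upperChar c) else s)
    PySem.Set.empty
  String.ofList (PySem.List.sorted (PySem.Set.diff chars removed) (fun x => x) false)

-- ===== PRECONDITION & SPEC =====
def Spec_normalize_perms_code (perms_code_list : List String) (out : String) : Prop := out = normalize_perms_code_alt perms_code_list
instance (perms_code_list : List String) (out : String) : Decidable (Spec_normalize_perms_code perms_code_list out) := by unfold Spec_normalize_perms_code; infer_instance

-- ===== CLAIM (what is proved, stated in full; the proofs are below) =====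
def Claim_equal_normalize_perms_code : Prop := ∀ (perms_code_list : List String), Dom_normalize_perms_code perms_code_list → Spec_normalize_perms_code perms_code_list (normalize_perms_code perms_code_list)

-- ===== LEMMAS AND PROOFS =====

theorem pvRemoveLoop_of_mem {cl : List Char} {c : Char} (hnd : cl.Nodup) (hc : c ∈ cl) :
    pvRemoveLoop cl c = cl.filter (fun x => x != c && x != PySem.Chars.upperChar c) := by
  rw [pvRemoveLoop]
  rw [PySem.List.remove?_eq_some_erase cl c hc]
  simp only
  have hnd1 : (cl.erase c).Nodup := hnd.erase c
  have hcne : c ∉ cl.erase c := fun hmem => ((hnd.mem_erase_iff).1 hmem).1 rfl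
  cases hu : PySem.List.remove? (cl.erase c) (PySem.Chars.upperChar c) with
  | none =>
    have hnotm : PySem.Chars.upperChar c ∉ cl.erase c := (PySem.List.remove?_eq_none_iff _ _).1 hu
    rw [hnd.erase_eq_filter c]
    apply List.filter_congr
    intro x hx
    by_cases hxc : x = c
    · simp [hxc]
    · have hxu : x ≠ PySem.Chars.upperChar c := by
        intro hh
        exact hnotm (by rw [← hh]; exact (hnd.mem_erase_iff).2 ⟨hxc, hx⟩)
      simp [hxc, hxu]
  | some cl2 =>
    have hum : PySem.Chars.upperChar c ∈ cl.erase c := by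
      by_contra hn
      rw [(PySem.List.remove?_eq_none_iff _ _).2 hn] at hu
      simp at hu
    rw [PySem.List.remove?_eq_some_erase _ _ hum] at hu
    cases hu
    have hcne2 : c ∉ (cl.erase c).erase (PySem.Chars.upperChar c) :=
      fun hmem => hcne (((hnd1.mem_erase_iff).1 hmem).2)
    simp only
    rw [pvRemoveLoop.eq_def, (PySem.List.remove?_eq_none_iff _ _).2 hcne2]
    simp only
    rw [hnd1.erase_eq_filter, hnd.erase_eq_filter, List.filter_filter]
    apply List.filter_congr
    intro x _
    rw [Bool.and_comm]

theorem islower_upperChar (c : Char) :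
    PySem.Chars.islower (PySem.Chars.upperChar c) = false := by
  unfold PySem.Chars.upperChar
  split_ifs with h
  · unfold PySem.Chars.islower at h ⊢
    simp only [Bool.and_eq_true, decide_eq_true_eq] at h
    have h1 : 97 ≤ c.toNat := h.1
    have h2 : c.toNat ≤ 122 := h.2
    have hle : ¬ ('a' ≤ Char.ofNat (c.toNat - 32)) := by
      intro hcon
      have hv : (Char.ofNat (c.toNat - 32)).toNat = c.toNat - 32 := by
        rw [Char.toNat_ofNat, if_pos (Or.inl (by omega))]
      have : 97 ≤ (Char.ofNat (c.toNat - 32)).toNat := hcon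
      omega
    simp [hle]
  · unfold PySem.Chars.islower at h ⊢
    simpa using h

theorem foldl_pvRemoveLoop (rl : List Char) : ∀ (cl : List Char), cl.Nodup → rl.Nodup →
    (∀ c ∈ rl, c ∈ cl) → (∀ c ∈ rl, PySem.Chars.islower c = true) →
    rl.foldl pvRemoveLoop cl
      = cl.filter (fun x => !(rl.contains x || rl.any (fun c => PySem.Chars.upperChar c == x))) := by
  induction rl with
  | nil => intro cl _ _ _ _; simp
  | cons c rs ih =>
    intro cl hnd hrnd hsub hlow
    have hc : c ∈ cl := hsub c (List.mem_cons_self ..)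
    have hlc : PySem.Chars.islower c = true := hlow c (List.mem_cons_self ..)
    simp only [List.foldl_cons]
    rw [pvRemoveLoop_of_mem hnd hc]
    rw [ih _ (hnd.filter _) hrnd.of_cons
      (fun c' hc' => by
        have hne : c' ≠ c := fun hh => (List.nodup_cons.1 hrnd).1 (hh ▸ hc')
        have hnu : c' ≠ PySem.Chars.upperChar c := fun hh => by
          have := hlow c' (List.mem_cons_of_mem _ hc')
          rw [hh, islower_upperChar] at this
          exact Bool.noConfusion this
        simp [List.mem_filter, hsub c' (List.mem_cons_of_mem _ hc'), hne, hnu])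
      (fun c' hc' => hlow c' (List.mem_cons_of_mem _ hc'))]
    rw [List.filter_filter]
    apply List.filter_congr
    intro x hx
    rw [Bool.eq_iff_iff]
    simp only [List.contains_cons, List.any_cons, Bool.and_eq_true,
      Bool.not_eq_true', Bool.or_eq_false_iff, bne_iff_ne,
      beq_eq_false_iff_ne, ne_eq]
    tauto

theorem mem_pvRemoved (l : List Char) : ∀ (s : PySem.Set Char) (x : Char),
    (x ∈ l.foldl
      (fun s c => if PySem.Chars.islower c then
        PySem.Set.add (PySem.Set.add s c) (PySem.Chars.upperChar c) else s) s
    ↔ x ∈ s ∨ ∃ c ∈ l, PySem.Chars.islower c = true ∧ (x = c ∨ x = PySem.Chars.upperChar c)) := by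
  induction l with
  | nil => intro s x; simp
  | cons c rs ih =>
    intro s x
    simp only [List.foldl_cons, List.mem_cons]
    rw [ih]
    by_cases hl : PySem.Chars.islower c
    · simp only [hl, if_true, PySem.Set.mem_add]
      constructor
      · rintro (((hs | h1) | h2) | ⟨c', hc', hlc', hx⟩)
        · exact Or.inl hs
        · exact Or.inr ⟨c, Or.inl rfl, hl, Or.inl h1⟩
        · exact Or.inr ⟨c, Or.inl rfl, hl, Or.inr h2⟩
        · exact Or.inr ⟨c', Or.inr hc', hlc', hx⟩
      · rintro (hs | ⟨c', (rfl | hc'), hlc', hx⟩)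
        · exact Or.inl (Or.inl (Or.inl hs))
        · rcases hx with h1 | h2
          · exact Or.inl (Or.inl (Or.inr h1))
          · exact Or.inl (Or.inr h2)
        · exact Or.inr ⟨c', hc', hlc', hx⟩
    · simp only [hl, Bool.false_eq_true, if_false]
      constructor
      · rintro (hs | ⟨c', hc', hlc', hx⟩)
        · exact Or.inl hs
        · exact Or.inr ⟨c', Or.inr hc', hlc', hx⟩
      · rintro (hs | ⟨c', (rfl | hc'), hlc', hx⟩)
        · exact Or.inl hs
        · exact absurd hlc' hl
        · exact Or.inr ⟨c', hc', hlc', hx⟩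

theorem pv_main_eq (perms_code_list : List String) :
    (let code_list : List Char := PySem.Set.ofList (PySem.Str.join "" perms_code_list).toList
    let remove_list : List Char := code_list.filter (fun i => PySem.Chars.islower i)
    let final : List Char := remove_list.foldl pvRemoveLoop code_list
    String.ofList (PySem.List.sorted final (fun x => x) false)) =
    (let chars : PySem.Set Char := PySem.Set.ofList (PySem.Str.join "" perms_code_list).toList
    let removed : PySem.Set Char := chars.foldl
      (fun s c => if PySem.Chars.islower c then
          PySem.Set.add (PySem.Set.add s c) (PySem.Chars.upperChar c) else s)
      PySem.Set.empty
    String.ofList (PySem.List.sorted (PySem.Set.diff chars removed) (fun x => x) false)) := by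
  simp only
  set L := PySem.Set.ofList (PySem.Str.join "" perms_code_list).toList with hL
  have hnd : List.Nodup L := PySem.Set.nodup_ofList _
  congr 1
  rw [foldl_pvRemoveLoop _ _ hnd (hnd.filter _)
    (fun c hc => (List.mem_filter.1 hc).1) (fun c hc => (List.mem_filter.1 hc).2)]
  show _ = PySem.List.sorted (PySem.Set.diff L _) _ false
  unfold PySem.Set.diff
  congr 1
  apply List.filter_congr
  intro x hx
  rw [Bool.eq_iff_iff]
  simp only [Bool.not_eq_true', Bool.or_eq_false_iff, List.any_eq_false, beq_iff_eq,
    List.contains_eq_mem, decide_eq_false_iff_not, PySem.Set.contains ]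
  rw [mem_pvRemoved]
  simp only [List.mem_filter, List.not_mem_nil, false_or, PySem.Set.empty, not_exists]
  push Not
  constructor
  · rintro ⟨h1, h2⟩ c hc hlc
    exact ⟨fun hh => h1 (by rw [hh]; exact hc) (by rw [hh]; exact hlc),
           fun hh => h2 c ⟨hc, hlc⟩ hh.symm⟩
  · intro hA
    exact ⟨fun hm hl => (hA x hm hl).1 rfl,
           fun c hcc hup => (hA c hcc.1 hcc.2).2 hup.symm⟩

-- ===== VERDICT (by name: the statement is the Claim_ definition above) =====
theorem normalize_perms_code_spec : Claim_equal_normalize_perms_code := by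
  intro perms_code_list _
  unfold Spec_normalize_perms_code normalize_perms_code normalize_perms_code_alt
  exact pv_main_eq perms_code_list
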